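-- pv_equiv track=rewrite | github.com/ChenghengLi/gibbons | src/utils.py | compute_weighted_endangered_energy_python
-- ===== SOURCE A (Python) =====
-- from typing import Dict, Tuple, List, Optional, Callable
--
-- def check_attack_python(q1: Tuple[int, int, int], q2: Tuple[int, int, int]) -> bool:
--     """
--     Check if two queens attack each other (pure Python for testing).
--
--     Args:
--         q1: First queen position (i, j, k)
--         q2: Second queen position (i, j, k)
--
--     Returns:
--         Boolean indicating if queens attack each other.
--     """
--     i1, j1, k1 = q1
--     i2, j2, k2 = q2
--
--     di = abs(i1 - i2)
--     dj = abs(j1 - j2)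
--     dk = abs(k1 - k2)
--
--     # Rook-type
--     if (i1 == i2 and j1 == j2) or (i1 == i2 and k1 == k2) or (j1 == j2 and k1 == k2):
--         return True
--
--     # Planar diagonals
--     if k1 == k2 and di == dj and di != 0:
--         return True
--     if j1 == j2 and di == dk and di != 0:
--         return True
--     if i1 == i2 and dj == dk and dj != 0:
--         return True
--
--     # Space diagonal
--     if di == dj == dk and di != 0:
--         return True
--
--     return False
--
-- def compute_weighted_endangered_energy_python(queens: List[Tuple[int, int, int]]) -> Tuple[int, int, int]:
--     """
--     Compute weighted endangered energy using Python (for verification).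
--
--     Args:
--         queens: List of queen positions as (i, j, k) tuples.
--
--     Returns:
--         Tuple of (total_energy, endangered_count, total_weight)
--     """
--     # Count endangered queens
--     n = len(queens)
--     endangered_set = set()
--     for i in range(n):
--         for j in range(i + 1, n):
--             if check_attack_python(queens[i], queens[j]):
--                 endangered_set.add(i)
--                 endangered_set.add(j)
--     endangered_count = len(endangered_set)
--
--     total_weight = sum(abs(q[0] + q[1] - 2 * q[2]) for q in queens)
--     total = endangered_count + total_weight
--     return total, endangered_count, total_weight
-- ===== SOURCE B (Python) =====
-- from typing import Dict, Tuple, List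
--
--
-- def _line_keys(q: Tuple[int, int, int]) -> List[Tuple[int, int, int]]:
--     """The 13 invariants of the attack lines through q: two queens attack
--     each other iff they share at least one of these keys."""
--     i, j, k = q
--     return [
--         (0, i, j), (1, i, k), (2, j, k),            # rook lines
--         (3, k, i + j), (4, k, i - j),               # diagonals in the k-plane
--         (5, j, i + k), (6, j, i - k),               # diagonals in the j-plane
--         (7, i, j + k), (8, i, j - k),               # diagonals in the i-plane
--         (9, i - j, i - k), (10, i - j, i + k),      # space diagonals
--         (11, i + j, i - k), (12, i + j, i + k),
--     ]
--
--
-- def compute_weighted_endangered_energy_python(queens: List[Tuple[int, int, int]]) -> Tuple[int, int, int]: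
--     cnt: Dict[Tuple[int, int, int], int] = {}
--     for q in queens:
--         for key in _line_keys(q):
--             cnt[key] = cnt.get(key, 0) + 1
--     endangered_count = 0
--     total_weight = 0
--     for q in queens:
--         if any(cnt[key] > 1 for key in _line_keys(q)):
--             endangered_count += 1
--         total_weight += abs(q[0] + q[1] - 2 * q[2])
--     return endangered_count + total_weight, endangered_count, total_weight
-- ===== Notes on version B (the rewrite author's own statement) =====
-- stated objective: faster
-- what changed: Replaces the all-pairs attack check with a single hash pass: each queen contributes its 13 attack-line invariants (rook/planar-diagonal/space-diagonal keys) to a counter dict, and a queen is endangered iff one of its keys has count >= 2.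
import Mathlib
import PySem

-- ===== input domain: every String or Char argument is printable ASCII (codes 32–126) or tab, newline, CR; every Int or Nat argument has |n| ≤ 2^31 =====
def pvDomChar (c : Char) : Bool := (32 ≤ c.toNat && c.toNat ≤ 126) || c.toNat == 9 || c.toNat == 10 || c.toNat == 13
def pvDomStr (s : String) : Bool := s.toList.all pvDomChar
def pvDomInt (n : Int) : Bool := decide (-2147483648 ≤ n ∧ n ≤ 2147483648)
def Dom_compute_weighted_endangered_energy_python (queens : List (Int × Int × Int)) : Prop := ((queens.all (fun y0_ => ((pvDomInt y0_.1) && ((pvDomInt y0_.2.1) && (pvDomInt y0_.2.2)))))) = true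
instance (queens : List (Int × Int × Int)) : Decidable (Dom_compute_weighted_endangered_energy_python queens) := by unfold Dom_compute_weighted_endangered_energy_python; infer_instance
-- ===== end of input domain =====

-- B replaces A's all-pairs attack test by one hash pass over 13 per-queen attack-line
-- invariants (a counter dict); a timing run measured B faster (asymptotically O(n) vs O(n^2)).

-- ===== PORT A =====
def check_attack_python (q1 q2 : Int × Int × Int) : Bool :=
  let i1 := q1.1; let j1 := q1.2.1; let k1 := q1.2.2
  let i2 := q2.1; let j2 := q2.2.1; let k2 := q2.2.2
  let di := |i1 - i2|
  let dj := |j1 - j2|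
  let dk := |k1 - k2|
  -- Rook-type
  if (i1 == i2 && j1 == j2) || (i1 == i2 && k1 == k2) || (j1 == j2 && k1 == k2) then true
  -- Planar diagonals
  else if k1 == k2 && di == dj && di != 0 then true
  else if j1 == j2 && di == dk && di != 0 then true
  else if i1 == i2 && dj == dk && dj != 0 then true
  -- Space diagonal
  else if di == dj && dj == dk && di != 0 then true
  else false

def compute_weighted_endangered_energy_python (queens : List (Int × Int × Int)) : Int × Int × Int :=
  let n : Int := queens.length
  let endangered_set : PySem.Set Int :=
    (PySem.List.pyRange 0 n 1).foldl (fun s i =>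
      (PySem.List.pyRange (i + 1) n 1).foldl (fun s j =>
        if check_attack_python (PySem.List.pyGetD queens i (0, 0, 0)) (PySem.List.pyGetD queens j (0, 0, 0))
        then PySem.Set.add (PySem.Set.add s i) j else s) s) PySem.Set.empty
  let endangered_count : Int := endangered_set.length
  let total_weight : Int := (queens.map (fun q => |q.1 + q.2.1 - 2 * q.2.2|)).sum
  (endangered_count + total_weight, endangered_count, total_weight)

-- ===== PORT B =====
def line_keys (q : Int × Int × Int) : List (Int × Int × Int) :=
  let i := q.1; let j := q.2.1; let k := q.2.2
  [(0, i, j), (1, i, k), (2, j, k),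
   (3, k, i + j), (4, k, i - j),
   (5, j, i + k), (6, j, i - k),
   (7, i, j + k), (8, i, j - k),
   (9, i - j, i - k), (10, i - j, i + k),
   (11, i + j, i - k), (12, i + j, i + k)]

def compute_weighted_endangered_energy_python_alt (queens : List (Int × Int × Int)) : Int × Int × Int :=
  let cnt : PySem.Dict (Int × Int × Int) Int :=
    queens.foldl (fun d q => (line_keys q).foldl (fun d key => d.insert key (d.getD key 0 + 1)) d)
      PySem.Dict.empty
  -- Python's cnt[key] is exact as getD key 0 here: every key looked up was inserted in the first loop
  let p : Int × Int :=
    queens.foldl (fun acc q =>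
      ((if (line_keys q).any (fun key => 1 < cnt.getD key 0) then acc.1 + 1 else acc.1),
       acc.2 + |q.1 + q.2.1 - 2 * q.2.2|)) (0, 0)
  (p.1 + p.2, p.1, p.2)

-- ===== PRECONDITION & SPEC =====
def Spec_compute_weighted_endangered_energy_python (queens : List (Int × Int × Int)) (out : Int × Int × Int) : Prop := out = compute_weighted_endangered_energy_python_alt queens
instance (queens : List (Int × Int × Int)) (out : Int × Int × Int) : Decidable (Spec_compute_weighted_endangered_energy_python queens out) := by unfold Spec_compute_weighted_endangered_energy_python; infer_instance

-- ===== CLAIM (what is proved, stated in full; the proofs are below) =====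
def Claim_equal_compute_weighted_endangered_energy_python : Prop := ∀ (queens : List (Int × Int × Int)), Dom_compute_weighted_endangered_energy_python queens → Spec_compute_weighted_endangered_energy_python queens (compute_weighted_endangered_energy_python queens)

-- ===== LEMMAS AND PROOFS =====

-- two queens attack each other iff they share one of the 13 line-invariant keys
theorem ite_true_or (c b : Bool) : ((if c then true else b) = true) ↔ (c = true ∨ b = true) := by
  cases c <;> simp

theorem attack_iff_shares_key (a b : Int × Int × Int) :
    check_attack_python a b = true ↔ ∃ k ∈ line_keys a, k ∈ line_keys b := by
  obtain ⟨i1, j1, k1⟩ := a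
  obtain ⟨i2, j2, k2⟩ := b
  have hD : (∃ k ∈ line_keys (i1, j1, k1), k ∈ line_keys (i2, j2, k2)) ↔
      (i1 = i2 ∧ j1 = j2) ∨ (i1 = i2 ∧ k1 = k2) ∨ (j1 = j2 ∧ k1 = k2) ∨
      (k1 = k2 ∧ i1 + j1 = i2 + j2) ∨ (k1 = k2 ∧ i1 - j1 = i2 - j2) ∨
      (j1 = j2 ∧ i1 + k1 = i2 + k2) ∨ (j1 = j2 ∧ i1 - k1 = i2 - k2) ∨
      (i1 = i2 ∧ j1 + k1 = j2 + k2) ∨ (i1 = i2 ∧ j1 - k1 = j2 - k2) ∨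
      (i1 - j1 = i2 - j2 ∧ i1 - k1 = i2 - k2) ∨ (i1 - j1 = i2 - j2 ∧ i1 + k1 = i2 + k2) ∨
      (i1 + j1 = i2 + j2 ∧ i1 - k1 = i2 - k2) ∨ (i1 + j1 = i2 + j2 ∧ i1 + k1 = i2 + k2) := by
    simp only [line_keys, List.mem_cons, List.not_mem_nil, or_false, exists_eq_or_imp,
      exists_eq_left, Prod.mk.injEq]
    norm_num
  rw [hD]
  show (if _ then true else _) = true ↔ _
  rw [ite_true_or, ite_true_or, ite_true_or, ite_true_or, ite_true_or]
  simp only [Bool.or_eq_true, Bool.and_eq_true, beq_iff_eq, bne_iff_ne, Int.abs_eq_natAbs,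
    Bool.false_eq_true, or_false]
  constructor
  · rintro (h1 | h2 | h3 | h4 | h5)
    · rcases h1 with (h | h) | h
      · exact Or.inl h
      · exact Or.inr (Or.inl h)
      · exact Or.inr (Or.inr (Or.inl h))
    · have hx : (k1 = k2 ∧ i1 + j1 = i2 + j2) ∨ (k1 = k2 ∧ i1 - j1 = i2 - j2) := by omega
      rcases hx with h | h
      · exact Or.inr (Or.inr (Or.inr (Or.inl h)))
      · exact Or.inr (Or.inr (Or.inr (Or.inr (Or.inl h))))
    · have hx : (j1 = j2 ∧ i1 + k1 = i2 + k2) ∨ (j1 = j2 ∧ i1 - k1 = i2 - k2) := by omega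
      rcases hx with h | h
      · exact Or.inr (Or.inr (Or.inr (Or.inr (Or.inr (Or.inl h)))))
      · exact Or.inr (Or.inr (Or.inr (Or.inr (Or.inr (Or.inr (Or.inl h))))))
    · have hx : (i1 = i2 ∧ j1 + k1 = j2 + k2) ∨ (i1 = i2 ∧ j1 - k1 = j2 - k2) := by omega
      rcases hx with h | h
      · exact Or.inr (Or.inr (Or.inr (Or.inr (Or.inr (Or.inr (Or.inr (Or.inl h)))))))
      · exact Or.inr (Or.inr (Or.inr (Or.inr (Or.inr (Or.inr (Or.inr (Or.inr (Or.inl h))))))))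
    · have hx : (i1 - j1 = i2 - j2 ∧ i1 - k1 = i2 - k2) ∨ (i1 - j1 = i2 - j2 ∧ i1 + k1 = i2 + k2) ∨
          (i1 + j1 = i2 + j2 ∧ i1 - k1 = i2 - k2) ∨ (i1 + j1 = i2 + j2 ∧ i1 + k1 = i2 + k2) := by omega
      rcases hx with h | h | h | h
      · exact Or.inr (Or.inr (Or.inr (Or.inr (Or.inr (Or.inr (Or.inr (Or.inr (Or.inr (Or.inl h)))))))))
      · exact Or.inr (Or.inr (Or.inr (Or.inr (Or.inr (Or.inr (Or.inr (Or.inr (Or.inr (Or.inr (Or.inl h))))))))))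
      · exact Or.inr (Or.inr (Or.inr (Or.inr (Or.inr (Or.inr (Or.inr (Or.inr (Or.inr (Or.inr (Or.inr (Or.inl h)))))))))))
      · exact Or.inr (Or.inr (Or.inr (Or.inr (Or.inr (Or.inr (Or.inr (Or.inr (Or.inr (Or.inr (Or.inr (Or.inr (h))))))))))))
  · rintro (h | h | h | h | h | h | h | h | h | h | h | h | h) <;> omega

theorem nodup_line_keys (q : Int × Int × Int) : (line_keys q).Nodup := by
  obtain ⟨i, j, k⟩ := q
  simp [line_keys]

-- the shared-key relation is symmetric
theorem shares_key_symm {a b : Int × Int × Int} :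
    (∃ k ∈ line_keys a, k ∈ line_keys b) → ∃ k ∈ line_keys b, k ∈ line_keys a := by
  rintro ⟨k, h1, h2⟩; exact ⟨k, h2, h1⟩

-- counting queens that own a key, via the flattened key list
theorem count_flatMap_line_keys (key : Int × Int × Int) (l : List (Int × Int × Int)) :
    (l.flatMap line_keys).count key = l.countP (fun q => (line_keys q).contains key) := by
  induction l with
  | nil => simp
  | cons q t ih =>
    simp only [List.flatMap_cons, List.count_append, List.countP_cons, ih]
    by_cases h : key ∈ line_keys q
    · rw [List.count_eq_one_of_mem (nodup_line_keys q) h]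
      simp [h, Nat.add_comm]
    · rw [List.count_eq_zero_of_not_mem h]
      simp [h]

-- the counter dict built by B's nested loop
theorem cnt_getD (queens : List (Int × Int × Int)) (key : Int × Int × Int) :
    (queens.foldl (fun d q => (line_keys q).foldl (fun d key => d.insert key (d.getD key 0 + 1)) d)
        PySem.Dict.empty).getD key 0
      = ((queens.flatMap line_keys).count key : Int) := by
  rw [← List.foldl_flatMap]
  rw [PySem.Dict.getD_foldl_insert_add_one]
  simp [PySem.Dict.getD_empty]

-- generic membership of the inner loop of A
theorem mem_inner_fold (att : Int → Int → Bool) (L : List Int) (i : Int) (s : List Int) (x : Int) :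
    x ∈ L.foldl (fun s j => if att i j then PySem.Set.add (PySem.Set.add s i) j else s) s ↔
      x ∈ s ∨ ∃ j ∈ L, att i j ∧ (x = i ∨ x = j) := by
  induction L generalizing s with
  | nil => simp
  | cons h t ih =>
    simp only [List.foldl_cons, List.mem_cons]
    by_cases ha : att i h
    · rw [if_pos ha, ih]
      simp [PySem.Set.mem_add, ha, or_assoc]
    · rw [if_neg ha, ih]
      constructor
      · rintro (hx | ⟨j, hj, hatt, hxi⟩)
        · exact Or.inl hx
        · exact Or.inr ⟨j, Or.inr hj, hatt, hxi⟩
      · rintro (hx | ⟨j, hj | hj, hatt, hxi⟩)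
        · exact Or.inl hx
        · exact absurd (hj ▸ hatt) (by simpa using ha)
        · exact Or.inr ⟨j, hj, hatt, hxi⟩

theorem mem_outer_fold (att : Int → Int → Bool) (n : Int) (I : List Int) (s : List Int) (x : Int) :
    x ∈ I.foldl (fun s i =>
        (PySem.List.pyRange (i + 1) n 1).foldl
          (fun s j => if att i j then PySem.Set.add (PySem.Set.add s i) j else s) s) s ↔
      x ∈ s ∨ ∃ i ∈ I, ∃ j, i < j ∧ j < n ∧ att i j = true ∧ (x = i ∨ x = j) := by
  induction I generalizing s with
  | nil => simp
  | cons h t ih =>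
    simp only [List.foldl_cons, List.mem_cons, ih, mem_inner_fold, PySem.List.mem_pyRange_one]
    constructor
    · rintro (⟨hx | ⟨j, ⟨hj1, hj2⟩, hatt, hxi⟩⟩ | ⟨i, hi, j, hij, hjn, hatt, hxi⟩)
      · exact Or.inl hx
      · exact Or.inr ⟨h, Or.inl rfl, j, by omega, hj2, hatt, hxi⟩
      · exact Or.inr ⟨i, Or.inr hi, j, hij, hjn, hatt, hxi⟩
    · rintro (hx | ⟨i, hi | hi, j, hij, hjn, hatt, hxi⟩)
      · exact Or.inl (Or.inl hx)
      · subst hi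
        exact Or.inl (Or.inr ⟨j, ⟨by omega, hjn⟩, hatt, hxi⟩)
      · exact Or.inr ⟨i, hi, j, hij, hjn, hatt, hxi⟩

theorem nodup_inner_fold (att : Int → Int → Bool) (L : List Int) (i : Int) (s : List Int)
    (hs : s.Nodup) :
    (L.foldl (fun s j => if att i j then PySem.Set.add (PySem.Set.add s i) j else s) s).Nodup := by
  induction L generalizing s with
  | nil => exact hs
  | cons h t ih =>
    simp only [List.foldl_cons]
    split
    · exact ih _ (PySem.Set.nodup_add _ _ (PySem.Set.nodup_add _ _ hs))
    · exact ih _ hs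

theorem nodup_outer_fold (att : Int → Int → Bool) (n : Int) (I : List Int) (s : List Int)
    (hs : s.Nodup) :
    (I.foldl (fun s i =>
        (PySem.List.pyRange (i + 1) n 1).foldl
          (fun s j => if att i j then PySem.Set.add (PySem.Set.add s i) j else s) s) s).Nodup := by
  induction I generalizing s with
  | nil => exact hs
  | cons h t ih => exact ih _ (nodup_inner_fold att _ h s hs)

-- a nodup list with a distinguished member has length ≥ 2 iff it has another member
theorem two_le_length_iff {M : List Int} (hnd : M.Nodup) {x : Int} (hx : x ∈ M) :
    2 ≤ M.length ↔ ∃ y ∈ M, y ≠ x := by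
  constructor
  · intro h2
    have hlen : 1 ≤ (M.erase x).length := by
      rw [List.length_erase_of_mem hx]; omega
    obtain ⟨y, hy⟩ := List.exists_mem_of_length_pos (l := M.erase x) (by omega)
    have hm := (List.Nodup.mem_erase_iff hnd).1 hy
    exact ⟨y, hm.2, hm.1⟩
  · rintro ⟨y, hy, hyx⟩
    have h1 : y ∈ M.erase x := (List.Nodup.mem_erase_iff hnd).2 ⟨hyx, hy⟩
    have h2 := List.length_erase_of_mem hx
    have h3 := List.length_pos_of_mem h1
    have h4 := List.length_pos_of_mem hx
    omega


-- proof-layer names for the two programs' pieces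
def wSum (queens : List (Int × Int × Int)) : Int :=
  (queens.map (fun q => |q.1 + q.2.1 - 2 * q.2.2|)).sum

def aAtt (queens : List (Int × Int × Int)) (i j : Int) : Bool :=
  check_attack_python (PySem.List.pyGetD queens i (0, 0, 0)) (PySem.List.pyGetD queens j (0, 0, 0))

def aSet (queens : List (Int × Int × Int)) : List Int :=
  (PySem.List.pyRange 0 (queens.length : Int) 1).foldl (fun s i =>
    (PySem.List.pyRange (i + 1) (queens.length : Int) 1).foldl (fun s j =>
      if aAtt queens i j then PySem.Set.add (PySem.Set.add s i) j else s) s) PySem.Set.empty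

def bCnt (queens : List (Int × Int × Int)) : PySem.Dict (Int × Int × Int) Int :=
  queens.foldl (fun d q => (line_keys q).foldl (fun d key => d.insert key (d.getD key 0 + 1)) d)
    PySem.Dict.empty

def keyOwners (queens : List (Int × Int × Int)) (key : Int × Int × Int) : Nat :=
  queens.countP (fun q => (line_keys q).contains key)

def endangeredB (queens : List (Int × Int × Int)) (q : Int × Int × Int) : Bool :=
  (line_keys q).any (fun key => decide ((1 : Int) < (keyOwners queens key : Int)))

theorem A_eq (queens : List (Int × Int × Int)) :
    compute_weighted_endangered_energy_python queens =
      (((aSet queens).length : Int) + wSum queens, ((aSet queens).length : Int), wSum queens) := rfl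

theorem keyOwners_eq_getD (queens : List (Int × Int × Int)) (key : Int × Int × Int) :
    (bCnt queens).getD key 0 = (keyOwners queens key : Int) := by
  rw [bCnt.eq_def, cnt_getD, count_flatMap_line_keys]; rfl

theorem alt_eq (queens : List (Int × Int × Int)) :
    compute_weighted_endangered_energy_python_alt queens =
      ((queens.countP (endangeredB queens) : Int) + wSum queens,
       (queens.countP (endangeredB queens) : Int), wSum queens) := by
  have hfun : (fun q => (line_keys q).any (fun key => decide ((1 : Int) < (bCnt queens).getD key 0)))
      = endangeredB queens := by
    funext q
    simp only [keyOwners_eq_getD, endangeredB]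
  have hp : queens.foldl (fun acc q =>
      ((if (line_keys q).any (fun key => decide ((1 : Int) < (bCnt queens).getD key 0)) then acc.1 + 1 else acc.1),
       acc.2 + |q.1 + q.2.1 - 2 * q.2.2|)) ((0 : Int), (0 : Int)) =
      ((queens.countP (endangeredB queens) : Int), wSum queens) := by
    rw [PySem.List.foldl_prod_mk
      (f := fun acc q => if (line_keys q).any (fun key => decide ((1 : Int) < (bCnt queens).getD key 0)) then acc + 1 else acc)
      (g := fun acc q => acc + |q.1 + q.2.1 - 2 * q.2.2|)]
    rw [PySem.List.foldl_if_add_one, PySem.List.foldl_add, hfun]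
    simp [wSum]
  show ((queens.foldl (fun acc q =>
      ((if (line_keys q).any (fun key => decide ((1 : Int) < (bCnt queens).getD key 0)) then acc.1 + 1 else acc.1),
       acc.2 + |q.1 + q.2.1 - 2 * q.2.2|)) ((0 : Int), (0 : Int))).1 +
     (queens.foldl (fun acc q =>
      ((if (line_keys q).any (fun key => decide ((1 : Int) < (bCnt queens).getD key 0)) then acc.1 + 1 else acc.1),
       acc.2 + |q.1 + q.2.1 - 2 * q.2.2|)) ((0 : Int), (0 : Int))).2,
     (queens.foldl (fun acc q =>
      ((if (line_keys q).any (fun key => decide ((1 : Int) < (bCnt queens).getD key 0)) then acc.1 + 1 else acc.1),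
       acc.2 + |q.1 + q.2.1 - 2 * q.2.2|)) ((0 : Int), (0 : Int))).1,
     (queens.foldl (fun acc q =>
      ((if (line_keys q).any (fun key => decide ((1 : Int) < (bCnt queens).getD key 0)) then acc.1 + 1 else acc.1),
       acc.2 + |q.1 + q.2.1 - 2 * q.2.2|)) ((0 : Int), (0 : Int))).2) = _
  rw [hp]

theorem count_eq (queens : List (Int × Int × Int)) :
    ((aSet queens).length : Int) = (queens.countP (endangeredB queens) : Int) := by
  have hSmem : ∀ x, x ∈ aSet queens ↔
      ∃ i ∈ PySem.List.pyRange 0 (queens.length : Int) 1, ∃ j, i < j ∧ j < (queens.length : Int) ∧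
        aAtt queens i j = true ∧ (x = i ∨ x = j) := by
    intro x
    have h := mem_outer_fold (aAtt queens) (queens.length : Int)
      (PySem.List.pyRange 0 (queens.length : Int) 1) [] x
    simpa [aSet] using h
  have hnd : (aSet queens).Nodup :=
    nodup_outer_fold (aAtt queens) (queens.length : Int) _ [] (by simp)
  have hsymm : ∀ i j, aAtt queens i j = true ↔ aAtt queens j i = true := by
    intro i j
    rw [aAtt.eq_def, aAtt.eq_def, attack_iff_shares_key, attack_iff_shares_key]
    exact ⟨shares_key_symm, shares_key_symm⟩
  have hmem2 : ∀ x, x ∈ aSet queens ↔ x ∈ PySem.List.pyRange 0 (queens.length : Int) 1 ∧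
      decide (∃ j ∈ PySem.List.pyRange 0 (queens.length : Int) 1, j ≠ x ∧ aAtt queens x j = true) = true := by
    intro x
    rw [hSmem]
    simp only [decide_eq_true_eq, PySem.List.mem_pyRange_one]
    constructor
    · rintro ⟨i, hi, j, hij, hjn, hatt, rfl | rfl⟩
      · exact ⟨hi, j, ⟨by omega, hjn⟩, by omega, hatt⟩
      · exact ⟨⟨by omega, hjn⟩, i, hi, by omega, (hsymm i x).1 hatt⟩
    · rintro ⟨hx, j, hj, hne, hatt⟩
      rcases lt_or_gt_of_ne (Ne.symm hne) with h | h
      · exact ⟨x, hx, j, h, hj.2, hatt, Or.inl rfl⟩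
      · exact ⟨j, hj, x, h, hx.2, (hsymm x j).1 hatt, Or.inr rfl⟩
  have hRnd : (PySem.List.pyRange 0 (queens.length : Int) 1).Nodup := PySem.List.nodup_pyRange_one _ _
  have hperm : List.Perm (aSet queens) ((PySem.List.pyRange 0 (queens.length : Int) 1).filter
      (fun x => decide (∃ j ∈ PySem.List.pyRange 0 (queens.length : Int) 1, j ≠ x ∧ aAtt queens x j = true))) := by
    rw [List.perm_ext_iff_of_nodup hnd (List.Nodup.filter _ hRnd)]
    intro x
    rw [hmem2 x, List.mem_filter]
  have hq : (PySem.List.pyRange 0 (queens.length : Int) 1).map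
      (fun j => PySem.List.pyGetD queens j ((0 : Int), (0 : Int), (0 : Int))) = queens :=
    PySem.List.map_pyGetD_pyRange_zero' queens _
  have hgen : ∀ (p : (Int × Int × Int) → Bool), queens.countP p =
      ((PySem.List.pyRange 0 (queens.length : Int) 1).filter
        (fun x => p (PySem.List.pyGetD queens x (0, 0, 0)))).length := by
    intro p
    conv_lhs => rw [← hq]
    rw [List.countP_map, List.countP_eq_length_filter]
    rfl
  have hcount := hgen (endangeredB queens)
  have hOwn : ∀ key, keyOwners queens key =
      ((PySem.List.pyRange 0 (queens.length : Int) 1).filter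
        (fun j => (line_keys (PySem.List.pyGetD queens j (0, 0, 0))).contains key)).length := by
    intro key
    rw [keyOwners.eq_def]
    exact hgen _
  have hpt : ∀ x ∈ PySem.List.pyRange 0 (queens.length : Int) 1,
      endangeredB queens (PySem.List.pyGetD queens x (0, 0, 0)) =
      decide (∃ j ∈ PySem.List.pyRange 0 (queens.length : Int) 1, j ≠ x ∧ aAtt queens x j = true) := by
    intro x hx
    rw [Bool.eq_iff_iff]
    rw [endangeredB.eq_def]
    simp only [List.any_eq_true, decide_eq_true_eq]
    constructor
    · rintro ⟨key, hkey, hlt⟩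
      rw [hOwn key] at hlt
      have hxf : x ∈ (PySem.List.pyRange 0 (queens.length : Int) 1).filter
          (fun j => (line_keys (PySem.List.pyGetD queens j (0, 0, 0))).contains key) := by
        rw [List.mem_filter]
        exact ⟨hx, by simpa using hkey⟩
      have h2 : 2 ≤ ((PySem.List.pyRange 0 (queens.length : Int) 1).filter
          (fun j => (line_keys (PySem.List.pyGetD queens j (0, 0, 0))).contains key)).length := by
        omega
      obtain ⟨y, hy, hyx⟩ := (two_le_length_iff (List.Nodup.filter _ hRnd) hxf).1 h2
      rw [List.mem_filter] at hy
      refine ⟨y, hy.1, hyx, ?_⟩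
      rw [aAtt.eq_def, attack_iff_shares_key]
      exact ⟨key, hkey, by simpa using hy.2⟩
    · rintro ⟨j, hj, hne, hatt⟩
      rw [aAtt.eq_def, attack_iff_shares_key] at hatt
      obtain ⟨key, hk1, hk2⟩ := hatt
      refine ⟨key, hk1, ?_⟩
      rw [hOwn key]
      have hxf : x ∈ (PySem.List.pyRange 0 (queens.length : Int) 1).filter
          (fun j => (line_keys (PySem.List.pyGetD queens j (0, 0, 0))).contains key) := by
        rw [List.mem_filter]; exact ⟨hx, by simpa using hk1⟩
      have hjf : j ∈ (PySem.List.pyRange 0 (queens.length : Int) 1).filter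
          (fun j => (line_keys (PySem.List.pyGetD queens j (0, 0, 0))).contains key) := by
        rw [List.mem_filter]; exact ⟨hj, by simpa using hk2⟩
      have := (two_le_length_iff (List.Nodup.filter _ hRnd) hxf).2 ⟨j, hjf, hne⟩
      omega
  have := hperm.length_eq
  rw [this, hcount, List.filter_congr hpt]

-- ===== VERDICT (by name: the statement is the Claim_ definition above) =====
theorem compute_weighted_endangered_energy_python_spec : Claim_equal_compute_weighted_endangered_energy_python := by
  intro queens _
  unfold Spec_compute_weighted_endangered_energy_python
  rw [A_eq, alt_eq, count_eq]
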